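-- pv_equiv track=rewrite | github.com/m21p99/ProgettoJBE | bwt/sais.py | find_buckets
-- ===== SOURCE A (Python) =====
-- def find_buckets(s):
--     """Find the head and tail of each bucket."""
--     buckets = {}
--     for c in s:
--         buckets[c] = buckets.get(c, 0) + 1
--
--     # Calculate bucket heads and tails
--     heads = {}
--     tails = {}
--     start = 0
--     for c in sorted(buckets.keys()):
--         heads[c] = start
--         tails[c] = start + buckets[c] - 1
--         start += buckets[c]
--     return heads, tails
-- ===== SOURCE B (Python) =====
-- def find_buckets(s):
--     """Find the head and tail of each bucket."""
--     ordered = sorted(s)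
--     n = len(ordered)
--     heads = {}
--     tails = {}
--     i = 0
--     while i < n:
--         c = ordered[i]
--         j = i
--         while j + 1 < n and ordered[j + 1] == c:
--             j += 1
--         heads[c] = i
--         tails[c] = j
--         i = j + 1
--     return heads, tails
-- ===== Notes on version B (the rewrite author's own statement) =====
-- stated objective: alternative
-- what changed: A counts characters in a dict and then prefix-sums the counts over the sorted distinct keys; B instead sorts the string once and walks the sorted list detecting run boundaries, taking each run's first index as the bucket head and its last index as the tail (it trades the counting pass for a sort).
import Mathlib
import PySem

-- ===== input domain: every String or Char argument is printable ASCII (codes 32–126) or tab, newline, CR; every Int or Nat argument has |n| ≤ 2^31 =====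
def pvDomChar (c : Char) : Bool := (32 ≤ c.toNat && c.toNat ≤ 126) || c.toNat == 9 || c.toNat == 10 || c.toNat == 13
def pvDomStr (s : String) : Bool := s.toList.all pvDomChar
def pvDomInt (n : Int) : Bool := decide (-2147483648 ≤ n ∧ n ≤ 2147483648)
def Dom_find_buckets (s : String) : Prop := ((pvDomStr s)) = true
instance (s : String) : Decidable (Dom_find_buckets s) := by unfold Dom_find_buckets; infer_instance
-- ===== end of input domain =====

-- B replaces A's count-then-prefix-sum over a dict by a run-boundary walk over sorted(s): an alternative algorithm (heads/tails as first/last index of each run), not claimed faster.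

-- ===== PORT A =====
-- loop body of A's second for-loop (heads/tails/start updates), kept as a named helper
def pvStepA (m : String → Int)
    (acc : PySem.Dict String Int × PySem.Dict String Int × Int) (c : String) :
    PySem.Dict String Int × PySem.Dict String Int × Int :=
  (acc.1.insert c acc.2.2, acc.2.1.insert c (acc.2.2 + m c - 1), acc.2.2 + m c)

def find_buckets (s : String) : (List (String × Int)) × (List (String × Int)) :=
  -- for c in s: buckets[c] = buckets.get(c, 0) + 1   (iterating a string yields 1-char strings)
  let chars := s.toList.map (fun c => String.singleton c)
  let buckets := chars.foldl (fun d c => d.insert c (d.getD c 0 + 1)) PySem.Dict.empty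
  -- for c in sorted(buckets.keys()): heads[c] = start; tails[c] = start + buckets[c] - 1; start += buckets[c]
  let res := (PySem.List.sorted buckets.keys (fun k => k) false).foldl
      (pvStepA (fun c => buckets.getD c 0)) (PySem.Dict.empty, PySem.Dict.empty, 0)
  (res.1.items, res.2.1.items)

-- ===== PORT B =====
-- inner while loop: starting at index j on entry, advance j while the next element equals c;
-- returns (final j, elements after the run)
def pvRun (c : String) : List String → Int → Int × List String
  | [], j => (j, [])
  | x :: xs, j => if x == c then pvRun c xs (j + 1) else (j, x :: xs)

theorem pvRun_length_le (c : String) : ∀ (l : List String) (j : Int), (pvRun c l j).2.length ≤ l.length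
  | [], _ => le_refl _
  | x :: xs, j => by
    simp only [pvRun]
    split
    · exact le_trans (pvRun_length_le c xs (j + 1)) (Nat.le_succ _)
    · exact le_refl _

-- outer while loop over the runs of the sorted list; i is the index of the run head;
-- the dicts heads/tails only ever receive fresh keys, so they are built directly as lists
def pvWalk : List String → Int → (List (String × Int)) × (List (String × Int))
  | [], _ => ([], [])
  | c :: rest, i =>
    let p := pvRun c rest i
    let r := pvWalk p.2 (p.1 + 1)
    ((c, i) :: r.1, (c, p.1) :: r.2)
termination_by l _ => l.length
decreasing_by
  have h := pvRun_length_le c rest i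
  simp only [List.length_cons]
  omega

def find_buckets_alt (s : String) : (List (String × Int)) × (List (String × Int)) :=
  let ordered := PySem.List.sorted (s.toList.map (fun c => String.singleton c)) (fun k => k) false
  pvWalk ordered 0

-- ===== PRECONDITION & SPEC =====
def Spec_find_buckets (s : String) (out : (List (String × Int)) × (List (String × Int))) : Prop := out = find_buckets_alt s
instance (s : String) (out : (List (String × Int)) × (List (String × Int))) : Decidable (Spec_find_buckets s out) := by unfold Spec_find_buckets; infer_instance

-- ===== CLAIM (what is proved, stated in full; the proofs are below) =====
def Claim_equal_find_buckets : Prop := ∀ (s : String), Dom_find_buckets s → Spec_find_buckets s (find_buckets s)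

-- ===== LEMMAS AND PROOFS =====

-- common normal form: heads/tails entries for the key list ks starting at offset st, with multiplicity m
def pvSpec (m : String → Int) : List String → Int → (List (String × Int)) × (List (String × Int))
  | [], _ => ([], [])
  | k :: ks, st =>
    let r := pvSpec m ks (st + m k)
    ((k, st) :: r.1, (k, st + m k - 1) :: r.2)

theorem pvSpec_congr (m m' : String → Int) :
    ∀ (ks : List String) (st : Int), (∀ k ∈ ks, m k = m' k) → pvSpec m ks st = pvSpec m' ks st
  | [], _, _ => rfl
  | k :: ks, st, h => by
    have hk : m k = m' k := h k (List.mem_cons_self)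
    have ht := pvSpec_congr m m' ks (st + m k) (fun x hx => h x (List.mem_cons_of_mem _ hx))
    simp only [pvSpec]
    rw [ht, hk]

theorem pvRun_sorted_eq (c : String) :
    ∀ (l : List String) (j : Int), l.Pairwise (· ≤ ·) → (∀ y ∈ l, c ≤ y) →
      pvRun c l j = (j + (l.count c : Int), l.filter (fun x => !(x == c)))
  | [], j, _, _ => by simp [pvRun]
  | x :: xs, j, hp, hle => by
    have hhead := (List.pairwise_cons.1 hp).1
    have htail := (List.pairwise_cons.1 hp).2
    simp only [pvRun]
    by_cases hxc : x = c
    · subst hxc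
      have ih := pvRun_sorted_eq x xs (j + 1) htail hhead
      simp only [BEq.rfl, if_true, ih, List.count_cons_self, List.filter_cons, Bool.not_true,
        Bool.false_eq_true, if_false, Prod.mk.injEq]
      refine ⟨?_, trivial⟩
      push_cast; ring
    · have hne : (x == c) = false := by simp [hxc]
      have hcnot : c ∉ x :: xs := by
        intro hmem
        rcases List.mem_cons.1 hmem with h1 | h2
        · exact hxc h1.symm
        · have hxley : x ≤ c := hhead c h2
          have hclex : c ≤ x := hle x List.mem_cons_self
          exact hxc (le_antisymm hxley hclex)
      rw [hne]
      simp only [if_false, Bool.false_eq_true]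
      have hcount : (x :: xs).count c = 0 := List.count_eq_zero.2 hcnot
      have hfilter : (x :: xs).filter (fun y => !(y == c)) = x :: xs := by
        apply List.filter_eq_self.2
        intro y hy
        simp only [Bool.not_eq_eq_eq_not, Bool.not_true, beq_eq_false_iff_ne, ne_eq]
        intro hyc; exact hcnot (hyc ▸ hy)
      rw [hcount, hfilter]
      simp

-- first-occurrence dedup (PySem.Set.ofList): folding over elements already containing c skips the c's
theorem pvFoldAdd_skip (c : String) :
    ∀ (xs : List String) (acc : PySem.Set String), acc.contains c = true →
      List.foldl PySem.Set.add acc xs = List.foldl PySem.Set.add acc (xs.filter (fun x => !(x == c)))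
  | [], _, _ => rfl
  | x :: xs, acc, hc => by
    by_cases hxc : x = c
    · subst hxc
      have hmem : x ∈ acc := by simpa [PySem.Set.contains] using hc
      have hskip : PySem.Set.add acc x = acc := by
        simp [PySem.Set.add, PySem.Set.contains, hmem]
      simp only [List.filter_cons, BEq.rfl, Bool.not_true, Bool.false_eq_true, if_false,
        List.foldl_cons, hskip]
      exact pvFoldAdd_skip x xs acc hc
    · have hne : (!(x == c)) = true := by simp [hxc]
      have hc' : (PySem.Set.add acc x).contains c = true := by
        simp only [PySem.Set.add]
        split
        · exact hc
        · simp only [PySem.Set.contains] at hc ⊢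
          rw [List.contains_append, hc, Bool.true_or]
      simp only [List.filter_cons, hne, if_true, List.foldl_cons]
      exact pvFoldAdd_skip c xs (PySem.Set.add acc x) hc'

theorem pvFoldAdd_cons (c : String) :
    ∀ (xs : List String) (acc : List String), c ∉ xs →
      List.foldl PySem.Set.add (c :: acc) xs = c :: List.foldl PySem.Set.add acc xs
  | [], _, _ => rfl
  | x :: xs, acc, hc => by
    have hxc : x ≠ c := by rintro rfl; exact hc List.mem_cons_self
    have hcontains : (c :: acc).contains x = ((acc : List String).contains x) := by
      simp only [List.contains_cons]
      have hcx : (x == c) = false := by rw [beq_eq_false_iff_ne]; exact hxc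
      rw [hcx, Bool.false_or]
    have hadd : PySem.Set.add (c :: acc) x = c :: PySem.Set.add acc x := by
      simp only [PySem.Set.add, PySem.Set.contains, hcontains]
      split
      · rfl
      · rfl
    simp only [List.foldl_cons, hadd]
    exact pvFoldAdd_cons c xs (PySem.Set.add acc x) (fun h => hc (List.mem_cons_of_mem _ h))

theorem pvDedup_cons (c : String) (rest : List String) :
    PySem.List.dedup (c :: rest) = c :: PySem.List.dedup (rest.filter (fun x => !(x == c))) := by
  have hnotmem : c ∉ rest.filter (fun x => !(x == c)) := by
    intro h
    have := List.of_mem_filter h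
    simp at this
  have hadd0 : PySem.Set.add PySem.Set.empty c = [c] := rfl
  calc PySem.List.dedup (c :: rest)
      = List.foldl PySem.Set.add [c] rest := by
        simp only [PySem.List.dedup_eq_ofList, PySem.Set.ofList, List.foldl_cons, hadd0]
    _ = List.foldl PySem.Set.add [c] (rest.filter (fun x => !(x == c))) := by
        apply pvFoldAdd_skip
        simp [PySem.Set.contains]
    _ = c :: List.foldl PySem.Set.add [] (rest.filter (fun x => !(x == c))) :=
        pvFoldAdd_cons c _ [] hnotmem
    _ = c :: PySem.List.dedup (rest.filter (fun x => !(x == c))) := by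
        simp only [PySem.List.dedup_eq_ofList, PySem.Set.ofList, PySem.Set.empty]

theorem pvDedup_pairwise_lt :
    ∀ (n : Nat) (l : List String), l.length ≤ n → l.Pairwise (· ≤ ·) →
      (PySem.List.dedup l).Pairwise (· < ·)
  | _, [], _, _ => by simp [PySem.List.dedup, PySem.Set.ofList]
  | 0, _ :: _, h, _ => by simp at h
  | n + 1, c :: rest, h, hp => by
    rw [pvDedup_cons]
    constructor
    · intro y hy
      have hy' : y ∈ rest.filter (fun x => !(x == c)) := by
        have := (PySem.Set.mem_ofList _ y).1 (by rw [← PySem.List.dedup_eq_ofList]; exact hy)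
        exact this
      have hyr : y ∈ rest := List.mem_of_mem_filter hy'
      have hyne : y ≠ c := by
        have := List.of_mem_filter hy'
        simpa using this
      exact lt_of_le_of_ne ((List.pairwise_cons.1 hp).1 y hyr) (Ne.symm hyne)
    · apply pvDedup_pairwise_lt n
      · have := List.length_filter_le (fun x => !(x == c)) rest
        simp only [List.length_cons] at h
        omega
      · exact ((List.pairwise_cons.1 hp).2).filter _

theorem pvWalk_eq_spec :
    ∀ (n : Nat) (l : List String) (i : Int), l.length ≤ n → l.Pairwise (· ≤ ·) →
      pvWalk l i = pvSpec (fun k => (l.count k : Int)) (PySem.List.dedup l) i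
  | _, [], _, _, _ => by simp [pvWalk, PySem.List.dedup, PySem.Set.ofList, pvSpec]
  | 0, _ :: _, _, h, _ => by simp at h
  | n + 1, c :: rest, i, h, hp => by
    have hle : ∀ y ∈ rest, c ≤ y := (List.pairwise_cons.1 hp).1
    have hrun := pvRun_sorted_eq c rest i (List.pairwise_cons.1 hp).2 hle
    set rest' := rest.filter (fun x => !(x == c)) with hrest'
    have hlen' : rest'.length ≤ n := by
      rw [hrest']
      have := List.length_filter_le (fun x => !(x == c)) rest
      simp only [List.length_cons] at h
      omega
    have hpair' : rest'.Pairwise (· ≤ ·) := ((List.pairwise_cons.1 hp).2).filter _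
    have ih := pvWalk_eq_spec n rest' (i + (rest.count c : Int) + 1) hlen' hpair'
    have hcongr : pvSpec (fun k => (rest'.count k : Int)) (PySem.List.dedup rest')
        (i + (rest.count c : Int) + 1)
        = pvSpec (fun k => ((c :: rest).count k : Int)) (PySem.List.dedup rest')
        (i + (rest.count c : Int) + 1) := by
      apply pvSpec_congr
      intro k hk
      have hk' : k ∈ rest' := (PySem.Set.mem_ofList _ k).1
        (by rw [← PySem.List.dedup_eq_ofList]; exact hk)
      have hkne : k ≠ c := by
        have := List.of_mem_filter hk'
        simpa using this
      have h1 : rest'.count k = rest.count k := by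
        rw [hrest']
        exact List.count_filter (by simp [hkne])
      have h2 : (c :: rest).count k = rest.count k := by
        simp [List.count_cons]
        intro hck; exact absurd hck.symm hkne
      rw [h1, h2]
    rw [pvWalk]
    rw [pvDedup_cons, pvSpec]
    simp only [hrun, ← hrest']
    have hmc : ((c :: rest).count c : Int) = (rest.count c : Int) + 1 := by
      rw [List.count_cons_self]; push_cast; ring
    rw [ih, hcongr]
    simp only [hmc]
    have e1 : i + (List.count c rest : Int) + 1 = i + ((List.count c rest : Int) + 1) := by ring
    have e2 : i + ((List.count c rest : Int) + 1) - 1 = i + (List.count c rest : Int) := by ring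
    rw [e1, e2]

theorem pvFoldA_items (m : String → Int) :
    ∀ (ks : List String) (h t : PySem.Dict String Int) (st : Int),
      ks.Nodup → (∀ k ∈ ks, h.contains k = false) → (∀ k ∈ ks, t.contains k = false) →
      (ks.foldl (pvStepA m) (h, t, st)).1.items = h.items ++ (pvSpec m ks st).1 ∧
      (ks.foldl (pvStepA m) (h, t, st)).2.1.items = t.items ++ (pvSpec m ks st).2
  | [], h, t, st, _, _, _ => by simp [pvSpec]
  | k :: ks, h, t, st, hnd, hfh, hft => by
    have hk_h : h.contains k = false := hfh k List.mem_cons_self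
    have hk_t : t.contains k = false := hft k List.mem_cons_self
    have hfresh_h : ∀ x ∈ ks, (h.insert k st).contains x = false := by
      intro x hx
      rw [PySem.Dict.contains_insert]
      have hxk : (x == k) = false := by
        have : x ≠ k := fun he => (List.nodup_cons.1 hnd).1 (he ▸ hx)
        simp [this]
      rw [hxk, Bool.false_or]
      exact hfh x (List.mem_cons_of_mem _ hx)
    have hfresh_t : ∀ x ∈ ks, (t.insert k (st + m k - 1)).contains x = false := by
      intro x hx
      rw [PySem.Dict.contains_insert]
      have hxk : (x == k) = false := by
        have : x ≠ k := fun he => (List.nodup_cons.1 hnd).1 (he ▸ hx)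
        simp [this]
      rw [hxk, Bool.false_or]
      exact hft x (List.mem_cons_of_mem _ hx)
    have ih := pvFoldA_items m ks (h.insert k st) (t.insert k (st + m k - 1)) (st + m k)
      (List.nodup_cons.1 hnd).2 hfresh_h hfresh_t
    simp only [List.foldl_cons, pvStepA] at ih ⊢
    rw [ih.1, ih.2, PySem.Dict.items_insert_of_not_contains _ _ hk_h,
      PySem.Dict.items_insert_of_not_contains _ _ hk_t]
    simp [pvSpec]

theorem pvSortedKeys_eq (chars : List String) :
    PySem.List.sorted (PySem.Set.ofList chars) (fun k => k) false
      = PySem.List.dedup (PySem.List.sorted chars (fun k => k) false) := by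
  apply PySem.List.sorted_eq_of_perm_of_pairwise_lt
  · have hnd1 : (PySem.List.dedup (PySem.List.sorted chars (fun k => k) false)).Nodup := by
      rw [PySem.List.dedup_eq_ofList]; exact PySem.Set.nodup_ofList _
    have hnd2 : (PySem.Set.ofList chars : List String).Nodup := PySem.Set.nodup_ofList _
    rw [List.perm_ext_iff_of_nodup hnd1 hnd2]
    intro a
    rw [PySem.List.dedup_eq_ofList, PySem.Set.mem_ofList, PySem.Set.mem_ofList]
    exact ⟨fun ha => (PySem.List.mem_sorted _ _ _ _).1 ha,
      fun ha => (PySem.List.mem_sorted _ _ _ _).2 ha⟩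
  · exact pvDedup_pairwise_lt _ _ (le_refl _) (PySem.List.sorted_pairwise chars (fun k => k))

-- ===== VERDICT (by name: the statement is the Claim_ definition above) =====
theorem find_buckets_spec : Claim_equal_find_buckets := by
  intro s _
  unfold Spec_find_buckets find_buckets find_buckets_alt
  set chars := s.toList.map (fun c => String.singleton c) with hchars
  simp only [PySem.Dict.foldl_insert_getD_add_one_eq_counter, PySem.Dict.keys_counter]
  have hnodup : (PySem.List.sorted (PySem.Set.ofList chars) (fun k => k) false).Nodup :=
    (PySem.List.sorted_perm _ _ _).nodup_iff.2 (PySem.Set.nodup_ofList _)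
  have hfold := pvFoldA_items (fun c => (PySem.Dict.counter chars).getD c 0)
    (PySem.List.sorted (PySem.Set.ofList chars) (fun k => k) false)
    PySem.Dict.empty PySem.Dict.empty 0 hnodup
    (fun k _ => PySem.Dict.contains_empty k) (fun k _ => PySem.Dict.contains_empty k)
  rw [hfold.1, hfold.2]
  have hwalk := pvWalk_eq_spec (PySem.List.sorted chars (fun k => k) false).length
    (PySem.List.sorted chars (fun k => k) false) 0 (le_refl _)
    (PySem.List.sorted_pairwise chars (fun k => k))
  rw [hwalk]
  have hm : (fun c => (PySem.Dict.counter chars).getD c 0)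
      = (fun k => ((PySem.List.sorted chars (fun k => k) false).count k : Int)) := by
    funext k
    rw [PySem.Dict.getD_counter, (PySem.List.sorted_perm chars (fun k => k) false).count_eq]
  rw [hm, pvSortedKeys_eq]
  have hempty : (PySem.Dict.empty : PySem.Dict String Int).items = [] := rfl
  rw [hempty]
  simp
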